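-- pv_equiv track=rewrite | github.com/LIVENlab/enbios | enbios2/analyse/experiment_exporter.py | scenario_name_generator
-- ===== SOURCE A (Python) =====
-- from typing import Dict, Union, List, TYPE_CHECKING
--
-- def scenario_name_generator(scenarios: List[str]):
--     """
--     This is some very specific code, for scenarios in the decades after 2000
--     :param scenarios:
--     :return:
--     """
--     # scenario_splits = [s.split("_") for s in scenarios]
--     # scenario_types = set([s[0] for s in scenario_splits])
--     sce_grouped = {}
--     for sce in scenarios:
--         sce_type, sce_year = sce.split("_")
--         sce_grouped.setdefault(sce_type, []).append(sce_year[2:])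
--     # create a string for each scenario type
--     sce_strs = []
--     for sce_type, sce_years in sce_grouped.items():
--         sce_strs.append(f"{sce_type[:5]}_{'_'.join(sce_years)}")
--     return "_".join(sce_strs)
-- ===== SOURCE B (Python) =====
-- def scenario_name_generator(scenarios):
--     """First-occurrence scan with an inner gather pass; no dict, flat piece list."""
--     pairs = []
--     for sce in scenarios:
--         sce_type, sce_year = sce.split("_")
--         pairs.append((sce_type, sce_year[2:]))
--     pieces = []
--     seen = set()
--     for t, _ in pairs:
--         if t not in seen:
--             seen.add(t)
--             pieces.append(t[:5])
--             pieces.extend(y for u, y in pairs if u == t)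
--     return "_".join(pieces)
-- ===== Notes on version B (the rewrite author's own statement) =====
-- stated objective: alternative
-- what changed: Replaces A's dict-of-year-lists grouping plus per-group formatting pass with a dict-free scan that detects each type's first occurrence via a seen-set and gathers that type's tails with an inner filter pass over the pair list, emitting one flat piece list joined once.
import Mathlib
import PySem

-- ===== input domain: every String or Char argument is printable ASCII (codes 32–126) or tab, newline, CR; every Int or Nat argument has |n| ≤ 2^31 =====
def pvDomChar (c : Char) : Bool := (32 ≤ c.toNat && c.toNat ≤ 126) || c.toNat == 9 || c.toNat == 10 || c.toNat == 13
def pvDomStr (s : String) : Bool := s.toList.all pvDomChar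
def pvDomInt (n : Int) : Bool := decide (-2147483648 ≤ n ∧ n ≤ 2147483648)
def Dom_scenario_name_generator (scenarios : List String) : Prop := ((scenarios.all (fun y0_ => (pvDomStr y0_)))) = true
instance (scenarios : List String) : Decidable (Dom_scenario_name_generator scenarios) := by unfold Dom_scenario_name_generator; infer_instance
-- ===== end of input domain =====

-- B replaces A's dict-of-year-lists grouping with a dict-free first-occurrence scan that gathers
-- each type's tails by an inner filter pass and emits one flat piece list; return value only.

-- ===== PORT A =====
-- f"{sce_type[:5]}_{'_'.join(sce_years)}"
def pvFmtA (sce_type : String) (sce_years : List String) : String :=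
  PySem.Str.join "_" [PySem.Str.slice sce_type none (some 5), PySem.Str.join "_" sce_years]

-- loop body of A: sce_type, sce_year = sce.split("_"); setdefault(...).append(sce_year[2:])
def pvStepA (d : PySem.Dict String (List String)) (sce : String) : PySem.Dict String (List String) :=
  match PySem.Str.split? sce "_" with
  | some [sce_type, sce_year] =>
      d.modify sce_type [] (· ++ [PySem.Str.slice sce_year (some 2) none])
  | _ => d   -- Python raises ValueError here; excluded by Pre_

def scenario_name_generator (scenarios : List String) : String :=
  let sce_grouped : PySem.Dict String (List String) := scenarios.foldl pvStepA PySem.Dict.empty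
  let sce_strs := sce_grouped.items.map (fun p => pvFmtA p.1 p.2)
  PySem.Str.join "_" sce_strs

-- ===== PORT B =====
-- first loop of B: pairs.append((sce_type, sce_year[2:]))
def pvPairStep (acc : List (String × String)) (sce : String) : List (String × String) :=
  match PySem.Str.split? sce "_" with
  | some [sce_type, sce_year] => acc ++ [(sce_type, PySem.Str.slice sce_year (some 2) none)]
  | _ => acc   -- Python raises ValueError here; excluded by Pre_

-- second loop of B: on a first-seen type, append t[:5] and every tail of that type
def pvEmitStep (pairs : List (String × String)) (st : PySem.Set String × List String)
    (p : String × String) : PySem.Set String × List String :=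
  if PySem.Set.contains st.1 p.1 then st
  else (PySem.Set.add st.1 p.1,
    st.2 ++ [PySem.Str.slice p.1 none (some 5)]
         ++ (pairs.filter (fun q => q.1 == p.1)).map Prod.snd)

def scenario_name_generator_alt (scenarios : List String) : String :=
  let pairs := scenarios.foldl pvPairStep []
  PySem.Str.join "_" (pairs.foldl (pvEmitStep pairs) (PySem.Set.empty, [])).2

-- ===== PRECONDITION & SPEC =====
-- Pre_ excludes exactly the inputs where some element does not split into two pieces on "_",
-- on which Python's `sce_type, sce_year = sce.split("_")` raises ValueError.
def Pre_scenario_name_generator (scenarios : List String) : Prop :=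
  ∀ s ∈ scenarios, ((PySem.Str.split? s "_").getD []).length = 2
instance (scenarios : List String) : Decidable (Pre_scenario_name_generator scenarios) := by
  unfold Pre_scenario_name_generator; infer_instance

def pvWitness_scenario_name_generator : List String := ["ssp1_2020", "ssp1_2030", "ssp2_2050"]

def Spec_scenario_name_generator (scenarios : List String) (out : String) : Prop := out = scenario_name_generator_alt scenarios
instance (scenarios : List String) (out : String) : Decidable (Spec_scenario_name_generator scenarios out) := by unfold Spec_scenario_name_generator; infer_instance

-- ===== CLAIM (what is proved, stated in full; the proofs are below) =====
def Claim_equal_scenario_name_generator : Prop := ∀ (scenarios : List String), Dom_scenario_name_generator scenarios → Pre_scenario_name_generator scenarios → Spec_scenario_name_generator scenarios (scenario_name_generator scenarios)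

-- ===== LEMMAS AND PROOFS =====

-- abbreviation used throughout: the tails of one type gathered from the pair list
def pvTails (pairs : List (String × String)) (t : String) : List String :=
  (pairs.filter (fun q => q.1 == t)).map Prod.snd

-- the pair-building fold appends
theorem pvPairs_acc (l : List String) (acc : List (String × String)) :
    l.foldl pvPairStep acc = acc ++ l.foldl pvPairStep [] := by
  induction l generalizing acc with
  | nil => simp
  | cons sce rest ih =>
    simp only [List.foldl_cons]
    rw [ih (pvPairStep acc sce), ih (pvPairStep [] sce)]
    unfold pvPairStep
    match PySem.Str.split? sce "_" with
    | some [t, y] => simp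
    | none => simp
    | some [] => simp
    | some [a] => simp
    | some (a :: b :: c :: r) => simp

-- A's dict fold over scenarios is the canonical modify-fold over B's pair list
theorem pvFoldA_eq_pairs (l : List String) (d : PySem.Dict String (List String)) :
    l.foldl pvStepA d
      = (l.foldl pvPairStep []).foldl (fun d p => d.modify p.1 [] (· ++ [p.2])) d := by
  induction l generalizing d with
  | nil => rfl
  | cons sce rest ih =>
    simp only [List.foldl_cons]
    rw [ih (pvStepA d sce), pvPairs_acc rest (pvPairStep [] sce), List.foldl_append]
    congr 1
    unfold pvStepA pvPairStep
    match PySem.Str.split? sce "_" with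
    | some [t, y] => rfl
    | none => rfl
    | some [] => rfl
    | some [a] => rfl
    | some (a :: b :: c :: r) => rfl

-- B's emit fold, characterized by the not-yet-seen first occurrences
def pvNew (seen : PySem.Set String) : List String → List String
  | [] => []
  | t :: ks => if PySem.Set.contains seen t then pvNew seen ks
               else t :: pvNew (PySem.Set.add seen t) ks

theorem pvEmit_eq (pairs : List (String × String)) (rest : List (String × String))
    (seen : PySem.Set String) (acc : List String) :
    (rest.foldl (pvEmitStep pairs) (seen, acc)).2
      = acc ++ (pvNew seen (rest.map Prod.fst)).flatMap
          (fun t => PySem.Str.slice t none (some 5) :: pvTails pairs t) := by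
  induction rest generalizing seen acc with
  | nil => simp [pvNew]
  | cons p rest ih =>
    simp only [List.foldl_cons, List.map_cons, pvNew, pvEmitStep]
    by_cases h : PySem.Set.contains seen p.1
    · simp only [h, if_true]; exact ih seen acc
    · simp only [h, if_false, Bool.false_eq_true, ih]
      simp [pvTails, List.flatMap_cons]

theorem pvNew_eq (ks : List String) (seen : PySem.Set String) :
    seen ++ pvNew seen ks = ks.foldl PySem.Set.add seen := by
  induction ks generalizing seen with
  | nil => simp [pvNew]
  | cons t ks ih =>
    simp only [pvNew, List.foldl_cons]
    by_cases h : PySem.Set.contains seen t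
    · rw [if_pos h, show PySem.Set.add seen t = seen from by
        simp only [PySem.Set.add]; rw [if_pos h]]
      exact ih seen
    · rw [if_neg h, show PySem.Set.add seen t = seen ++ [t] from by
        simp only [PySem.Set.add]; rw [if_neg h],
        ← ih (seen ++ [t])]
      simp

-- join over char-level lists
theorem pvJoinChars_append (sep : List Char) (a b : List (List Char)) (ha : a ≠ []) (hb : b ≠ []) :
    PySem.Chars.join sep (a ++ b) = PySem.Chars.join sep a ++ sep ++ PySem.Chars.join sep b := by
  induction a with
  | nil => exact absurd rfl ha
  | cons x a ih =>
    cases a with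
    | nil =>
      cases b with
      | nil => exact absurd rfl hb
      | cons y bs => simp [PySem.Chars.join_cons_cons, PySem.Chars.join_singleton]
    | cons x' a' =>
      have ih' := ih (by simp)
      rw [List.cons_append, List.cons_append, PySem.Chars.join_cons_cons, ← List.cons_append, ih',
        PySem.Chars.join_cons_cons]
      simp

theorem pvJoinChars_flatten (sep : List Char) (L : List (List (List Char)))
    (h : ∀ l ∈ L, l ≠ []) :
    PySem.Chars.join sep L.flatten = PySem.Chars.join sep (L.map (PySem.Chars.join sep)) := by
  induction L with
  | nil => rfl
  | cons a L ih =>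
    cases L with
    | nil => simp [PySem.Chars.join_singleton]
    | cons b L' =>
      have ha : a ≠ [] := h a (by simp)
      have hb : b ≠ [] := h b (by simp)
      have hflat : (b :: L').flatten ≠ [] := by
        cases b with
        | nil => exact absurd rfl hb
        | cons c cs => simp
      rw [List.flatten_cons, pvJoinChars_append sep a (b :: L').flatten ha hflat,
        ih (fun l hl => h l (by simp [hl]))]
      simp [PySem.Chars.join_cons_cons]

-- pvFmtA is the flat join of the group piece, at the char level
theorem pvFmtA_toList (t : String) (ys : List String) (hys : ys ≠ []) :
    (pvFmtA t ys).toList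
      = PySem.Chars.join "_".toList
          ((PySem.Str.slice t none (some 5) :: ys).map String.toList) := by
  cases ys with
  | nil => exact absurd rfl hys
  | cons y ys' =>
    simp only [pvFmtA, PySem.Str.toList_join, List.map_cons, List.map_nil]
    rw [PySem.Chars.join_cons_cons, PySem.Chars.join_singleton, PySem.Chars.join_cons_cons]

-- the final join equality over the distinct type list
theorem pvJoin_flat (K : List String) (tl : String → List String)
    (h : ∀ t ∈ K, tl t ≠ []) :
    PySem.Str.join "_" (K.flatMap (fun t => PySem.Str.slice t none (some 5) :: tl t))
      = PySem.Str.join "_" (K.map (fun t => pvFmtA t (tl t))) := by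
  rw [← String.toList_inj]
  simp only [PySem.Str.toList_join]
  have : (K.flatMap (fun t => PySem.Str.slice t none (some 5) :: tl t)).map String.toList
      = (K.map (fun t => (PySem.Str.slice t none (some 5) :: tl t).map String.toList)).flatten := by
    simp [List.flatMap_def, List.map_flatten, List.map_map, Function.comp_def]
  rw [this, pvJoinChars_flatten _ _ (by intro l hl; simp at hl; obtain ⟨t, ht, rfl⟩ := hl; simp)]
  congr 1
  rw [List.map_map, List.map_map]
  refine List.map_congr_left (fun t ht => ?_)
  exact (pvFmtA_toList t (tl t) (h t ht)).symm

-- a foldl of Set.add only ever holds elements of the seed or of the list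
theorem pvMem_foldl_add (l : List String) (s : PySem.Set String) (x : String)
    (h : x ∈ l.foldl PySem.Set.add s) : x ∈ s ∨ x ∈ l := by
  induction l generalizing s with
  | nil => exact Or.inl h
  | cons a l ih =>
    simp only [List.foldl_cons] at h
    rcases ih _ h with hs | hl
    · by_cases ha : PySem.Set.contains s a
      · rw [show PySem.Set.add s a = s from by simp only [PySem.Set.add]; rw [if_pos ha]] at hs
        exact Or.inl hs
      · rw [show PySem.Set.add s a = s ++ [a] from by simp only [PySem.Set.add]; rw [if_neg ha]] at hs
        rcases List.mem_append.mp hs with h1 | h2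
        · exact Or.inl h1
        · exact Or.inr (by simp [List.mem_singleton.mp h2])
    · exact Or.inr (List.mem_cons_of_mem _ hl)

-- membership in pvNew from empty seen = membership among the firsts
theorem pvTails_ne_nil (pairs : List (String × String)) (t : String)
    (ht : t ∈ pairs.map Prod.fst) : pvTails pairs t ≠ [] := by
  obtain ⟨p, hp, rfl⟩ := List.mem_map.mp ht
  have : p ∈ pairs.filter (fun q => q.1 == p.1) := List.mem_filter.mpr ⟨hp, by simp⟩
  simp only [pvTails, ne_eq, List.map_eq_nil_iff]
  intro hnil
  rw [hnil] at this
  exact (List.not_mem_nil this)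

-- ===== VERDICT (by name: the statement is the Claim_ definition above) =====
theorem scenario_name_generator_spec : Claim_equal_scenario_name_generator := by
  intro scenarios _ _
  show scenario_name_generator scenarios = scenario_name_generator_alt scenarios
  simp only [scenario_name_generator, scenario_name_generator_alt]
  set P := scenarios.foldl pvPairStep [] with hP
  -- A's dict, characterized
  rw [pvFoldA_eq_pairs scenarios PySem.Dict.empty, ← hP]
  set D := P.foldl (fun d p => d.modify p.1 [] (· ++ [p.2])) PySem.Dict.empty with hD
  have hkeys : D.keys = PySem.Set.ofList (P.map Prod.fst) := by
    rw [hD, PySem.Dict.keys_foldl_modify_key]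
    simp [PySem.Set.update, PySem.Set.ofList_eq_foldl, PySem.Dict.keys_empty]
  have hnodup : D.keys.Nodup := by
    rw [hD]
    exact PySem.Dict.nodup_keys_foldl_modify_key P Prod.fst [] _ PySem.Dict.empty
      (by simp [PySem.Dict.keys_empty])
  have hgetD : ∀ t, D.getD t [] = pvTails P t := by
    intro t
    rw [hD, PySem.Dict.getD_foldl_modify_append]
    simp [pvTails, PySem.Dict.getD_empty]
  have hitems : D.items = D.keys.map (fun k => (k, D.getD k [])) :=
    PySem.Dict.items_eq_map_keys D hnodup []
  -- B's fold, characterized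
  rw [pvEmit_eq P P PySem.Set.empty []]
  have hnew : pvNew PySem.Set.empty (P.map Prod.fst) = PySem.Set.ofList (P.map Prod.fst) := by
    have := pvNew_eq (P.map Prod.fst) PySem.Set.empty
    simpa [PySem.Set.empty, PySem.Set.ofList_eq_foldl] using this
  rw [hnew, List.nil_append, hitems, hkeys, List.map_map]
  have : ((fun p : String × List String => pvFmtA p.1 p.2) ∘ fun k => (k, D.getD k []))
      = fun t => pvFmtA t (D.getD t []) := rfl
  rw [this]
  have hmap : (PySem.Set.ofList (P.map Prod.fst)).map (fun t => pvFmtA t (D.getD t []))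
      = (PySem.Set.ofList (P.map Prod.fst)).map (fun t => pvFmtA t (pvTails P t)) :=
    List.map_congr_left (fun t _ => by rw [hgetD t])
  rw [hmap]
  refine (pvJoin_flat _ _ (fun t ht => pvTails_ne_nil P t ?_)).symm
  rw [PySem.Set.ofList_eq_foldl] at ht
  rcases pvMem_foldl_add _ _ _ ht with h0 | hm
  · exact absurd h0 (List.not_mem_nil)
  · exact hm
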